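-- pv_equiv track=rewrite | github.com/suhteevah/job-hunter-mcp | scripts/swarm/wraith_apply_swarm.py | generate_cover_letter
-- ===== SOURCE A (Python) =====
-- def generate_cover_letter(company, title):
--     tl = title.lower()
--     if any(kw in tl for kw in ["ai", "ml", "machine learning", "data scientist", "llm", "nlp", "genai", "agent"]):
--         return (f"I am excited about the {title} role at {company}. With 10 years of software engineering "
--                 f"experience, I have built production AI/ML systems including LLM-powered applications, "
--                 f"RAG pipelines, autonomous agents, and ML inference infrastructure. I deployed a weather "
--                 f"prediction trading bot achieving 20x returns and built distributed AI inference fleets. "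
--                 f"I've authored 10+ production MCP servers and a 27K-line Rust browser automation framework. "
--                 f"My expertise in Python, FastAPI, vector databases, and cloud infrastructure makes me "
--                 f"a strong fit for {company}'s engineering team.")
--     if any(kw in tl for kw in ["infrastructure", "platform", "sre", "devops", "cloud", "systems"]):
--         return (f"I am drawn to the {title} role at {company}. With 10 years building scalable "
--                 f"infrastructure, distributed systems, and cloud-native platforms, I bring deep expertise "
--                 f"in CI/CD automation, container orchestration, and production reliability. I've built "
--                 f"GPU inference clusters, industrial automation systems (ESP32, PID controllers), and "
--                 f"cloud infrastructure (AWS, Docker, Kubernetes).")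
--     if any(kw in tl for kw in ["full stack", "fullstack", "frontend", "react", "typescript"]):
--         return (f"I am excited about the {title} role at {company}. With 10 years spanning full-stack "
--                 f"development, I have built production apps using React, TypeScript, Next.js, and Python. "
--                 f"My recent work includes AI-powered browser automation (27K lines Rust), real-time "
--                 f"trading interfaces, and developer tooling including 10+ MCP servers.")
--     if any(kw in tl for kw in ["backend", "back-end", "api", "server", "data engineer"]):
--         return (f"I am excited about the {title} role at {company}. With 10 years building production "
--                 f"backend systems in Python, Rust, TypeScript, and distributed architectures, I have "
--                 f"built high-performance APIs, data pipelines, and microservices at real-world scale.")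
--     if any(kw in tl for kw in ["qa", "quality", "test", "sdet"]):
--         return (f"I am excited about the {title} role at {company}. With 10 years spanning test automation, "
--                 f"CI/CD, and quality engineering, I've built browser automation frameworks (27K lines Rust), "
--                 f"test infrastructure, and production monitoring systems.")
--     return (f"I am excited about the {title} role at {company}. With 10 years spanning AI/ML systems, "
--             f"cloud infrastructure, full-stack development, and industrial automation, I bring a versatile "
--             f"skillset and proven track record shipping production systems at scale.")
-- ===== SOURCE B (Python) =====
-- KEYWORD_GROUPS = [
--     ["ai", "ml", "machine learning", "data scientist", "llm", "nlp", "genai", "agent"],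
--     ["infrastructure", "platform", "sre", "devops", "cloud", "systems"],
--     ["full stack", "fullstack", "frontend", "react", "typescript"],
--     ["backend", "back-end", "api", "server", "data engineer"],
--     ["qa", "quality", "test", "sdet"],
-- ]
--
-- # CATEGORY maps every keyword to the index of its (priority-ordered) template.
-- CATEGORY = {kw: i for i, group in enumerate(KEYWORD_GROUPS) for kw in group}
--
-- TEMPLATES = [
--     ("I am excited about the {title} role at {company}. With 10 years of software engineering "
--      "experience, I have built production AI/ML systems including LLM-powered applications, "
--      "RAG pipelines, autonomous agents, and ML inference infrastructure. I deployed a weather "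
--      "prediction trading bot achieving 20x returns and built distributed AI inference fleets. "
--      "I've authored 10+ production MCP servers and a 27K-line Rust browser automation framework. "
--      "My expertise in Python, FastAPI, vector databases, and cloud infrastructure makes me "
--      "a strong fit for {company}'s engineering team."),
--     ("I am drawn to the {title} role at {company}. With 10 years building scalable "
--      "infrastructure, distributed systems, and cloud-native platforms, I bring deep expertise "
--      "in CI/CD automation, container orchestration, and production reliability. I've built "
--      "GPU inference clusters, industrial automation systems (ESP32, PID controllers), and "
--      "cloud infrastructure (AWS, Docker, Kubernetes)."),
--     ("I am excited about the {title} role at {company}. With 10 years spanning full-stack "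
--      "development, I have built production apps using React, TypeScript, Next.js, and Python. "
--      "My recent work includes AI-powered browser automation (27K lines Rust), real-time "
--      "trading interfaces, and developer tooling including 10+ MCP servers."),
--     ("I am excited about the {title} role at {company}. With 10 years building production "
--      "backend systems in Python, Rust, TypeScript, and distributed architectures, I have "
--      "built high-performance APIs, data pipelines, and microservices at real-world scale."),
--     ("I am excited about the {title} role at {company}. With 10 years spanning test automation, "
--      "CI/CD, and quality engineering, I've built browser automation frameworks (27K lines Rust), "
--      "test infrastructure, and production monitoring systems."),
--     ("I am excited about the {title} role at {company}. With 10 years spanning AI/ML systems, "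
--      "cloud infrastructure, full-stack development, and industrial automation, I bring a versatile "
--      "skillset and proven track record shipping production systems at scale."),
-- ]
--
--
-- def generate_cover_letter(company, title):
--     tl = title.lower()
--     # Pick the lowest-priority-numbered category among all keywords present in the title;
--     # the last TEMPLATES entry is the default for titles mentioning no keyword.
--     idx = min((cat for kw, cat in CATEGORY.items() if kw in tl),
--               default=len(KEYWORD_GROUPS))
--     return TEMPLATES[idx].format(title=title, company=company)
-- ===== Notes on version B (the rewrite author's own statement) =====
-- stated objective: alternative
-- what changed: Replaces the ordered per-group first-match if-chain by a flat keyword->category dictionary: B takes the minimum category index over all keywords found in the title (default = last) and renders the template at that index, instead of early-returning from five sequential group tests.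
import Mathlib
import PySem

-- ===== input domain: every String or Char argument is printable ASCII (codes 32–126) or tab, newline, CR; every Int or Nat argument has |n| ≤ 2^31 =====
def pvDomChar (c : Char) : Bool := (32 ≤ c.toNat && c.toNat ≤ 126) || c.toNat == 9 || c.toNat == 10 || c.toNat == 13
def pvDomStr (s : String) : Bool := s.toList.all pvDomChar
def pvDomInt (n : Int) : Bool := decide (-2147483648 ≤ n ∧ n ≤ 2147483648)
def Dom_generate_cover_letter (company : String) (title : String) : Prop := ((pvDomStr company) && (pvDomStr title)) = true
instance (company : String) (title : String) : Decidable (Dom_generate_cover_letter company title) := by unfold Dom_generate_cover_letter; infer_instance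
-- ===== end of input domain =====

-- B replaces A's five sequential first-match group tests by a flat keyword→category map:
-- the minimum category index among keywords present in the title selects the template (objective: alternative; same cost).

-- ===== PORT A =====
def generate_cover_letter (company : String) (title : String) : String :=
  let tl := PySem.Str.lower title
  if (["ai", "ml", "machine learning", "data scientist", "llm", "nlp", "genai", "agent"].any
      (fun kw => PySem.Str.isIn kw tl)) then
    "I am excited about the " ++ title ++ " role at " ++ company ++ ". With 10 years of software engineering experience, I have built production AI/ML systems including LLM-powered applications, RAG pipelines, autonomous agents, and ML inference infrastructure. I deployed a weather prediction trading bot achieving 20x returns and built distributed AI inference fleets. I've authored 10+ production MCP servers and a 27K-line Rust browser automation framework. My expertise in Python, FastAPI, vector databases, and cloud infrastructure makes me a strong fit for " ++ company ++ "'s engineering team."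
  else if (["infrastructure", "platform", "sre", "devops", "cloud", "systems"].any
      (fun kw => PySem.Str.isIn kw tl)) then
    "I am drawn to the " ++ title ++ " role at " ++ company ++ ". With 10 years building scalable infrastructure, distributed systems, and cloud-native platforms, I bring deep expertise in CI/CD automation, container orchestration, and production reliability. I've built GPU inference clusters, industrial automation systems (ESP32, PID controllers), and cloud infrastructure (AWS, Docker, Kubernetes)."
  else if (["full stack", "fullstack", "frontend", "react", "typescript"].any
      (fun kw => PySem.Str.isIn kw tl)) then
    "I am excited about the " ++ title ++ " role at " ++ company ++ ". With 10 years spanning full-stack development, I have built production apps using React, TypeScript, Next.js, and Python. My recent work includes AI-powered browser automation (27K lines Rust), real-time trading interfaces, and developer tooling including 10+ MCP servers."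
  else if (["backend", "back-end", "api", "server", "data engineer"].any
      (fun kw => PySem.Str.isIn kw tl)) then
    "I am excited about the " ++ title ++ " role at " ++ company ++ ". With 10 years building production backend systems in Python, Rust, TypeScript, and distributed architectures, I have built high-performance APIs, data pipelines, and microservices at real-world scale."
  else if (["qa", "quality", "test", "sdet"].any
      (fun kw => PySem.Str.isIn kw tl)) then
    "I am excited about the " ++ title ++ " role at " ++ company ++ ". With 10 years spanning test automation, CI/CD, and quality engineering, I've built browser automation frameworks (27K lines Rust), test infrastructure, and production monitoring systems."
  else
    "I am excited about the " ++ title ++ " role at " ++ company ++ ". With 10 years spanning AI/ML systems, cloud infrastructure, full-stack development, and industrial automation, I bring a versatile skillset and proven track record shipping production systems at scale."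

-- ===== PORT B =====
-- Source B's CATEGORY dict (all keys distinct, so insertion order is the flat group order)
def pvCategory : List (String × Nat) :=
  (["ai", "ml", "machine learning", "data scientist", "llm", "nlp", "genai", "agent"].map (fun k => (k, 0))) ++
  (["infrastructure", "platform", "sre", "devops", "cloud", "systems"].map (fun k => (k, 1))) ++
  (["full stack", "fullstack", "frontend", "react", "typescript"].map (fun k => (k, 2))) ++
  (["backend", "back-end", "api", "server", "data engineer"].map (fun k => (k, 3))) ++
  (["qa", "quality", "test", "sdet"].map (fun k => (k, 4)))

-- Source B's TEMPLATES; each '….format(title=…, company=…)' ported as a two-argument closure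
-- (exact: the placeholders are spliced once, never re-scanned)
def pvTemplates : List (String → String → String) :=
  [ fun title company =>
      "I am excited about the " ++ title ++ " role at " ++ company ++ ". With 10 years of software engineering experience, I have built production AI/ML systems including LLM-powered applications, RAG pipelines, autonomous agents, and ML inference infrastructure. I deployed a weather prediction trading bot achieving 20x returns and built distributed AI inference fleets. I've authored 10+ production MCP servers and a 27K-line Rust browser automation framework. My expertise in Python, FastAPI, vector databases, and cloud infrastructure makes me a strong fit for " ++ company ++ "'s engineering team.",
    fun title company =>
      "I am drawn to the " ++ title ++ " role at " ++ company ++ ". With 10 years building scalable infrastructure, distributed systems, and cloud-native platforms, I bring deep expertise in CI/CD automation, container orchestration, and production reliability. I've built GPU inference clusters, industrial automation systems (ESP32, PID controllers), and cloud infrastructure (AWS, Docker, Kubernetes).",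
    fun title company =>
      "I am excited about the " ++ title ++ " role at " ++ company ++ ". With 10 years spanning full-stack development, I have built production apps using React, TypeScript, Next.js, and Python. My recent work includes AI-powered browser automation (27K lines Rust), real-time trading interfaces, and developer tooling including 10+ MCP servers.",
    fun title company =>
      "I am excited about the " ++ title ++ " role at " ++ company ++ ". With 10 years building production backend systems in Python, Rust, TypeScript, and distributed architectures, I have built high-performance APIs, data pipelines, and microservices at real-world scale.",
    fun title company =>
      "I am excited about the " ++ title ++ " role at " ++ company ++ ". With 10 years spanning test automation, CI/CD, and quality engineering, I've built browser automation frameworks (27K lines Rust), test infrastructure, and production monitoring systems.",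
    fun title company =>
      "I am excited about the " ++ title ++ " role at " ++ company ++ ". With 10 years spanning AI/ML systems, cloud infrastructure, full-stack development, and industrial automation, I bring a versatile skillset and proven track record shipping production systems at scale." ]

-- min((cat for kw, cat in CATEGORY.items() if kw in tl), default=5), as a fold of min
def pvMinCat (tl : String) : Nat :=
  pvCategory.foldl (fun a p => if PySem.Str.isIn p.1 tl then min a p.2 else a) 5

def generate_cover_letter_alt (company : String) (title : String) : String :=
  let tl := PySem.Str.lower title
  (pvTemplates.getD (pvMinCat tl) (fun _ _ => "")) title company

-- ===== PRECONDITION & SPEC =====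
def Spec_generate_cover_letter (company : String) (title : String) (out : String) : Prop := out = generate_cover_letter_alt company title
instance (company : String) (title : String) (out : String) : Decidable (Spec_generate_cover_letter company title out) := by unfold Spec_generate_cover_letter; infer_instance

-- ===== CLAIM (what is proved, stated in full; the proofs are below) =====
def Claim_equal_generate_cover_letter : Prop := ∀ (company : String) (title : String), Dom_generate_cover_letter company title → Spec_generate_cover_letter company title (generate_cover_letter company title)

-- ===== LEMMAS AND PROOFS =====

-- folding min over one keyword group (all category g): result is min a g if any keyword matches
theorem pvFoldl_group (tl : String) (g : Nat) (kws : List String) (a : Nat) :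
    List.foldl (fun (a : Nat) (p : String × Nat) => if PySem.Str.isIn p.1 tl then min a p.2 else a)
        a (kws.map (fun k => (k, g)))
      = if kws.any (fun kw => PySem.Str.isIn kw tl) then min a g else a := by
  induction kws generalizing a with
  | nil => simp
  | cons k rest ih =>
      simp only [List.map_cons, List.foldl_cons, List.any_cons]
      by_cases h : PySem.Str.isIn k tl = true
      · rw [if_pos h, ih,
          if_pos (show (PySem.Str.isIn k tl || rest.any fun kw => PySem.Str.isIn kw tl) = true by rw [h]; exact Bool.true_or _)]
        by_cases hr : (rest.any fun kw => PySem.Str.isIn kw tl) = true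
        · rw [if_pos hr, min_assoc, min_self]
        · rw [if_neg hr]
      · rw [if_neg h, ih]
        rw [Bool.not_eq_true] at h
        by_cases hr : (rest.any fun kw => PySem.Str.isIn kw tl) = true
        · rw [if_pos hr,
            if_pos (show (PySem.Str.isIn k tl || rest.any fun kw => PySem.Str.isIn kw tl) = true by rw [h, hr]; rfl)]
        · rw [Bool.not_eq_true] at hr
          rw [if_neg (show ¬((PySem.Str.isIn k tl || rest.any fun kw => PySem.Str.isIn kw tl) = true) by
                rw [h, hr]; exact Bool.false_ne_true),
              if_neg (show ¬((rest.any fun kw => PySem.Str.isIn kw tl) = true) by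
                rw [hr]; exact Bool.false_ne_true)]

-- ===== VERDICT (by name: the statement is the Claim_ definition above) =====
theorem generate_cover_letter_spec : Claim_equal_generate_cover_letter := by
  intro company title _
  unfold Spec_generate_cover_letter generate_cover_letter generate_cover_letter_alt pvMinCat pvCategory
  simp only [List.foldl_append, pvFoldl_group]
  generalize (["ai", "ml", "machine learning", "data scientist", "llm", "nlp", "genai", "agent"].any (fun kw => PySem.Str.isIn kw (PySem.Str.lower title))) = b0
  generalize (["infrastructure", "platform", "sre", "devops", "cloud", "systems"].any (fun kw => PySem.Str.isIn kw (PySem.Str.lower title))) = b1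
  generalize (["full stack", "fullstack", "frontend", "react", "typescript"].any (fun kw => PySem.Str.isIn kw (PySem.Str.lower title))) = b2
  generalize (["backend", "back-end", "api", "server", "data engineer"].any (fun kw => PySem.Str.isIn kw (PySem.Str.lower title))) = b3
  generalize (["qa", "quality", "test", "sdet"].any (fun kw => PySem.Str.isIn kw (PySem.Str.lower title))) = b4
  cases b0 <;> cases b1 <;> cases b2 <;> cases b3 <;> cases b4 <;> simp [pvTemplates]
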